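-- pv_equiv track=rewrite | github.com/GRuizV/Self-Teaching-Repo | HackerRank/Problem Solving/Problem Solving Exercises - pt. II.py | index_caller
-- ===== SOURCE A (Python) =====
-- def index_caller(li, val):
--
--     occur = list()
--
--     try:
--         while True:
--             index = li.index(val)
--             occur.append(index)
--             li = li[index+1:]
--
--     except ValueError:
--         pass
--
--     return occur
-- ===== SOURCE B (Python) =====
-- def index_caller(li, val):
--     # single pass: track offset since just after the last match, append and reset at each occurrence
--     occur = []
--     c = 0
--     for x in li:
--         if x == val:
--             occur.append(c)
--             c = 0
--         else:
--             c += 1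
--     return occur
-- ===== Notes on version B (the rewrite author's own statement) =====
-- stated objective: alternative
-- what changed: Replaced the repeated li.index + slicing loop with a single pass that keeps an offset counter since the last match, appending and resetting it at each occurrence.
import Mathlib
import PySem

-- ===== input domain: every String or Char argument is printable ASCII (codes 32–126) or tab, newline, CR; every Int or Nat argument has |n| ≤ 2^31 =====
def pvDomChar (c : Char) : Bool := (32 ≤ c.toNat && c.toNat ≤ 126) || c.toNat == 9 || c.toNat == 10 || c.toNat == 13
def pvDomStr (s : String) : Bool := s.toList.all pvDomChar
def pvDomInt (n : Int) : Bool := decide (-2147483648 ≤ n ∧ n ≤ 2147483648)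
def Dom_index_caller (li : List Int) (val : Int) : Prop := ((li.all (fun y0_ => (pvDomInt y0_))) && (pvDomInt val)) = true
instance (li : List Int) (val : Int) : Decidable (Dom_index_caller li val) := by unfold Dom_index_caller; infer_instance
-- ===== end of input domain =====

-- B replaces A's repeated index()+slice scans with one pass keeping an offset counter since the last match.


-- ===== PORT A =====
-- li[index+1:] with index ≥ 0 is List.drop (index+1) (PySem.List.slice_from_natCast)
def index_caller (li : List Int) (val : Int) : List Int :=
  match h : PySem.List.index? li val with
  | none => []
  | some i => (i : Int) :: index_caller (li.drop (i + 1)) val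
termination_by li.length
decreasing_by
  obtain ⟨hk, -, -⟩ := PySem.List.getElem_of_index?_eq_some h
  simp only [List.length_drop]
  omega

-- ===== PORT B =====
def index_caller_go (val : Int) : List Int → Nat → List Int
  | [], _ => []
  | x :: xs, c => if x = val then (c : Int) :: index_caller_go val xs 0 else index_caller_go val xs (c + 1)

def index_caller_alt (li : List Int) (val : Int) : List Int :=
  index_caller_go val li 0

-- ===== PRECONDITION & SPEC =====
def Spec_index_caller (li : List Int) (val : Int) (out : List Int) : Prop := out = index_caller_alt li val
instance (li : List Int) (val : Int) (out : List Int) : Decidable (Spec_index_caller li val out) := by unfold Spec_index_caller; infer_instance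

-- ===== CLAIM (what is proved, stated in full; the proofs are below) =====
def Claim_equal_index_caller : Prop := ∀ (li : List Int) (val : Int), Dom_index_caller li val → Spec_index_caller li val (index_caller li val)

-- ===== LEMMAS AND PROOFS =====

theorem index_caller_go_eq (val : Int) (li : List Int) (c : Nat) :
    index_caller_go val li c =
      match PySem.List.index? li val with
      | none => []
      | some i => ((c + i : Nat) : Int) :: index_caller_go val (li.drop (i + 1)) 0 := by
  induction li generalizing c with
  | nil => simp [index_caller_go, PySem.List.index?_eq_idxOf?]
  | cons x xs ih =>
    by_cases hx : x = val
    · subst hx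
      conv_rhs => rw [PySem.List.index?_cons_self]
      simp [index_caller_go]
    · rw [PySem.List.index?_cons_of_ne xs hx]
      cases hi : PySem.List.index? xs val with
      | none =>
        rw [PySem.List.index?_eq_idxOf?] at hi
        simp [index_caller_go, hx, ih, hi]
      | some i =>
        simp only [index_caller_go, if_neg hx, Option.map_some]
        rw [ih, hi]
        simp only [List.drop_succ_cons]
        congr 2
        omega

theorem index_caller_eq_go :
    ∀ (n : Nat) (li : List Int), li.length ≤ n → ∀ val, index_caller li val = index_caller_go val li 0 := by
  intro n
  induction n with
  | zero =>
    intro li h val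
    have : li = [] := List.eq_nil_of_length_eq_zero (Nat.le_zero.mp h)
    subst this
    rw [index_caller, index_caller_go_eq]
    simp [PySem.List.index?_eq_idxOf?]
  | succ n ih =>
    intro li h val
    rw [index_caller, index_caller_go_eq]
    cases hi : PySem.List.index? li val with
    | none => simp
    | some i =>
      obtain ⟨hk, -, -⟩ := PySem.List.getElem_of_index?_eq_some hi
      simp only [Nat.zero_add]
      rw [ih (li.drop (i + 1)) (by simp only [List.length_drop]; omega) val]

-- ===== VERDICT (by name: the statement is the Claim_ definition above) =====
theorem index_caller_spec : Claim_equal_index_caller := by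
  intro li val _
  unfold Spec_index_caller index_caller_alt
  exact index_caller_eq_go li.length li (Nat.le_refl _) val
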